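-- pv_equiv track=rewrite | github.com/yasen-sotirov/TOOLS_ | 12_HACATHON/solution/dict_functions.py | aggregate_max
-- ===== SOURCE A (Python) =====
-- def aggregate_max(data):
--     my_dict = {}
--     for k, v in data:
--         if k in my_dict:
--             my_dict[k] = max(my_dict[k], v)
--         else:
--             my_dict[k] = v
--
--     return my_dict
-- ===== SOURCE B (Python) =====
-- def aggregate_max(data):
--     groups = {}
--     for k, v in data:
--         groups.setdefault(k, []).append(v)
--     return {k: max(vs) for k, vs in groups.items()}
-- ===== Notes on version B (the rewrite author's own statement) =====
-- stated objective: alternative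
-- what changed: Replaces the single running-max loop with two phases: a collect pass grouping every value per key into lists (setdefault/append), then a comprehension reducing each list with max.
import Mathlib
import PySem

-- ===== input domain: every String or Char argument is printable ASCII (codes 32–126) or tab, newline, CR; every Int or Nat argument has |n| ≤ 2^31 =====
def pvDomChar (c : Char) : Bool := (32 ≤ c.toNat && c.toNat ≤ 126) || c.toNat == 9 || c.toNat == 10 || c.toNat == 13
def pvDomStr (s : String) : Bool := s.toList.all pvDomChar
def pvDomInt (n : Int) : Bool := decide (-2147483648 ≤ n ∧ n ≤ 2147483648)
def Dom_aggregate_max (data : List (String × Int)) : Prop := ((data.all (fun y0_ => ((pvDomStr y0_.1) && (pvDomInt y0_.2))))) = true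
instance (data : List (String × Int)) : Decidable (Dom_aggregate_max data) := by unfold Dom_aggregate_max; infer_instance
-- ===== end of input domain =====

-- B replaces A's single running-max loop by two phases: collect all values per key into lists, then reduce each list with max (objective: alternative decomposition, same cost).

-- ===== PORT A =====
-- my_dict[k] inside the 'k in my_dict' branch is a present key; getD … 0 reads exactly that value
def aggregate_max (data : List (String × Int)) : List (String × Int) :=
  (data.foldl (fun d p =>
      if d.contains p.1 then d.insert p.1 (max (d.getD p.1 0) p.2)
      else d.insert p.1 p.2)
    PySem.Dict.empty).items

-- ===== PORT B =====
-- max(vs) on a nonempty list; the [] case is unreachable (grouped lists are nonempty)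
def pvMaxList (vs : List Int) : Int :=
  match vs with
  | [] => 0
  | h :: t => t.foldl max h

def aggregate_max_alt (data : List (String × Int)) : List (String × Int) :=
  ((data.foldl (fun d p => d.modify p.1 [] (· ++ [p.2])) PySem.Dict.empty).items.map
    (fun p => (p.1, pvMaxList p.2)))

-- ===== PRECONDITION & SPEC =====
def Spec_aggregate_max (data : List (String × Int)) (out : List (String × Int)) : Prop := out = aggregate_max_alt data
instance (data : List (String × Int)) (out : List (String × Int)) : Decidable (Spec_aggregate_max data out) := by unfold Spec_aggregate_max; infer_instance

-- ===== CLAIM (what is proved, stated in full; the proofs are below) =====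
def Claim_equal_aggregate_max : Prop := ∀ (data : List (String × Int)), Dom_aggregate_max data → Spec_aggregate_max data (aggregate_max data)

-- ===== LEMMAS AND PROOFS =====

-- A's step function written as a single insert (branches merged into the inserted value)
theorem stepA_eq_insert (d : PySem.Dict String Int) (p : String × Int) :
    (if d.contains p.1 then d.insert p.1 (max (d.getD p.1 0) p.2) else d.insert p.1 p.2)
      = d.insert p.1 (if d.contains p.1 then max (d.getD p.1 0) p.2 else p.2) := by
  split <;> simp_all

-- running max of A's fold, characterised by the per-key value list
theorem foldA_get? (l : List (String × Int)) (d : PySem.Dict String Int) (k : String) :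
    (l.foldl (fun d p =>
        if d.contains p.1 then d.insert p.1 (max (d.getD p.1 0) p.2) else d.insert p.1 p.2) d).get? k
      = ((l.filter (fun p => p.1 == k)).map (·.2)).foldl
          (fun acc v => some (match acc with | some w => max w v | none => v)) (d.get? k) := by
  induction l generalizing d with
  | nil => rfl
  | cons p t ih =>
    simp only [List.foldl_cons, List.filter_cons, ih]
    by_cases hk : p.1 = k
    · subst hk
      simp only [BEq.rfl, if_true, List.map_cons, List.foldl_cons]
      congr 1
      rw [stepA_eq_insert, PySem.Dict.get?_insert_self]
      rcases h : d.get? p.1 with _ | w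
      · simp [PySem.Dict.contains_eq_isSome_get?, h]
      · simp [PySem.Dict.contains_eq_isSome_get?, h, PySem.Dict.getD_of_get?_eq_some d 0 h]
    · have hbeq : (p.1 == k) = false := by simp [hk]
      simp only [hbeq]
      congr 1
      rw [stepA_eq_insert, PySem.Dict.get?_insert_of_ne d _ (Ne.symm hk)]

theorem foldMax_some (t : List Int) (w : Int) :
    t.foldl (fun acc v => some (match acc with | some w => max w v | none => v)) (some w)
      = some (t.foldl max w) := by
  induction t generalizing w with
  | nil => rfl
  | cons v t ih => simp [ih]

-- ===== VERDICT (by name: the statement is the Claim_ definition above) =====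
theorem aggregate_max_spec : Claim_equal_aggregate_max := by
  intro data _
  unfold Spec_aggregate_max aggregate_max aggregate_max_alt
  set dA := data.foldl (fun d p =>
      if d.contains p.1 then d.insert p.1 (max (d.getD p.1 0) p.2) else d.insert p.1 p.2)
    PySem.Dict.empty with hdA
  set dB := data.foldl (fun d p => d.modify p.1 [] (· ++ [p.2])) PySem.Dict.empty with hdB
  -- both folds produce the same key list (first-occurrence order), with Nodup
  have hAfold : dA = data.foldl
      (fun d p => d.insert p.1 ((fun d p => if d.contains p.1 then max (d.getD p.1 0) p.2 else p.2) d p))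
      PySem.Dict.empty := by
    rw [hdA]; congr 1; funext d p; exact stepA_eq_insert d p
  have hkeysA : dA.keys = PySem.Set.update (PySem.Dict.empty : PySem.Dict String Int).keys (data.map (·.1)) := by
    rw [hAfold]; exact PySem.Dict.keys_foldl_insert_key data (·.1) _ _
  have hkeysB : dB.keys = PySem.Set.update (PySem.Dict.empty : PySem.Dict String (List Int)).keys (data.map (·.1)) := by
    rw [hdB]; exact PySem.Dict.keys_foldl_modify_key data (·.1) [] _ _
  have hkeys : dA.keys = dB.keys := by rw [hkeysA, hkeysB]; simp
  have hndA : dA.keys.Nodup := by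
    rw [hAfold]
    exact PySem.Dict.nodup_keys_foldl_insert_key data (·.1) _ _ PySem.Dict.nodup_keys_empty
  have hndB : dB.keys.Nodup := by rw [hkeys] at hndA; exact hndA
  -- per-key values
  have hB : ∀ k, dB.getD k [] = (data.filter (fun p => p.1 == k)).map (·.2) := by
    intro k
    rw [hdB, PySem.Dict.getD_foldl_modify_append]
    simp
  have hA : ∀ k, k ∈ dA.keys → dA.getD k 0 = pvMaxList (dB.getD k []) := by
    intro k hk
    have hg : dA.get? k = ((data.filter (fun p => p.1 == k)).map (·.2)).foldl
        (fun acc v => some (match acc with | some w => max w v | none => v)) none := by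
      rw [hdA, foldA_get?]; simp
    have hmem : k ∈ data.map (·.1) := by
      rw [hkeysA] at hk
      simpa [PySem.Set.mem_update] using hk
    have hne : (data.filter (fun p => p.1 == k)).map (·.2) ≠ [] := by
      simp only [ne_eq, List.map_eq_nil_iff, List.filter_eq_nil_iff, not_forall]
      obtain ⟨p, hp, hpk⟩ := List.mem_map.mp hmem
      exact ⟨p, hp, by simp [hpk]⟩
    rcases h : (data.filter (fun p => p.1 == k)).map (·.2) with _ | ⟨w, t⟩
    · exact absurd h hne
    · rw [h] at hg
      simp only [List.foldl_cons] at hg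
      rw [foldMax_some] at hg
      rw [hB k, h, PySem.Dict.getD_of_get?_eq_some dA 0 hg]
      rfl
  -- assemble: items of both dicts via their (equal) key lists
  rw [PySem.Dict.items_eq_map_keys dA hndA 0, PySem.Dict.items_eq_map_keys dB hndB [],
    List.map_map, hkeys]
  refine List.map_congr_left ?_
  intro k hk
  have hAk := hA k (by rw [hkeys]; exact hk)
  simp [Function.comp, hAk]
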